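-- pv_equiv track=rewrite | github.com/gabrielghiorghita/pr4-ghiorghitaGabriel-encarnacionEngel-cordobaOscar-ASIXc1C | e3.py | suma_parells_i_senars
-- ===== SOURCE A (Python) =====
-- def suma_parells_i_senars(limit):
--     suma_parells = 0
--     suma_senars = 0
--
--     for num in range(limit):
--         if num % 2 == 0:
--             suma_parells += num
--         else:
--             suma_senars += num
--
--     return suma_parells, suma_senars
-- ===== SOURCE B (Python) =====
-- def suma_parells_i_senars(limit):
--     if limit <= 0:
--         return 0, 0
--     m = (limit + 1) // 2   # how many even numbers in range(limit)
--     q = limit // 2         # how many odd numbers in range(limit)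
--     return m * (m - 1), q * q
-- ===== Notes on version B (the rewrite author's own statement) =====
-- stated objective: faster
-- what changed: Replaced A's linear loop over range(limit) with closed-form arithmetic-series formulas computing the even and odd sums directly from the counts of evens and odds below the limit.
import Mathlib
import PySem

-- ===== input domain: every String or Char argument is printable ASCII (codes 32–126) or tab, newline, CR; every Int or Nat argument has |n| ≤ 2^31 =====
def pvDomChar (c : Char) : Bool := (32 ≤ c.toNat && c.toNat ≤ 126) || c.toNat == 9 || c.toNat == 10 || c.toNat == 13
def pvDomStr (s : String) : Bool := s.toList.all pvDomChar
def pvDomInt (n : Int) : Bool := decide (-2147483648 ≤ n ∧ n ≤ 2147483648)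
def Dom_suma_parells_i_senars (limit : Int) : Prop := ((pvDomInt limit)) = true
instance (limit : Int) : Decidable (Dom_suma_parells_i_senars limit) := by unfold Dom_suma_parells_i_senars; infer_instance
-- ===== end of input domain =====

-- B replaces A's O(limit) loop with closed-form arithmetic-series formulas (faster).


-- ===== PORT A =====
def suma_parells_i_senars (limit : Int) : List Int :=
  let st := (PySem.List.pyRange 0 limit 1).foldl
    (fun (st : Int × Int) num =>
      if PySem.Int.mod num 2 = 0 then (st.1 + num, st.2) else (st.1, st.2 + num))
    (0, 0)
  [st.1, st.2]

-- ===== PORT B =====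
def suma_parells_i_senars_alt (limit : Int) : List Int :=
  if limit ≤ 0 then [0, 0]
  else
    let m := PySem.Int.floordiv (limit + 1) 2
    let q := PySem.Int.floordiv limit 2
    [m * (m - 1), q * q]

-- ===== PRECONDITION & SPEC =====
def Spec_suma_parells_i_senars (limit : Int) (out : List Int) : Prop := out = suma_parells_i_senars_alt limit
instance (limit : Int) (out : List Int) : Decidable (Spec_suma_parells_i_senars limit out) := by unfold Spec_suma_parells_i_senars; infer_instance

-- ===== CLAIM (what is proved, stated in full; the proofs are below) =====
def Claim_equal_suma_parells_i_senars : Prop := ∀ (limit : Int), Dom_suma_parells_i_senars limit → Spec_suma_parells_i_senars limit (suma_parells_i_senars limit)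

-- ===== LEMMAS AND PROOFS =====

def pvE (n : Nat) : Int := (((n + 1) / 2 : Nat) : Int) * ((((n + 1) / 2 : Nat) : Int) - 1)
def pvO (n : Nat) : Int := ((n / 2 : Nat) : Int) * ((n / 2 : Nat) : Int)

lemma pvE_succ_even (n : Nat) (h : n % 2 = 0) : pvE (n + 1) = pvE n + n := by
  obtain ⟨k, rfl⟩ : ∃ k, n = 2 * k := ⟨n / 2, by omega⟩
  unfold pvE
  have h1 : (2 * k + 1 + 1) / 2 = k + 1 := by omega
  have h2 : (2 * k + 1) / 2 = k := by omega
  rw [h1, h2]; push_cast; ring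

lemma pvO_succ_even (n : Nat) (h : n % 2 = 0) : pvO (n + 1) = pvO n := by
  unfold pvO
  have : (n + 1) / 2 = n / 2 := by omega
  rw [this]

lemma pvE_succ_odd (n : Nat) (h : n % 2 = 1) : pvE (n + 1) = pvE n := by
  unfold pvE
  have : (n + 1 + 1) / 2 = (n + 1) / 2 := by omega
  rw [this]

lemma pvO_succ_odd (n : Nat) (h : n % 2 = 1) : pvO (n + 1) = pvO n + n := by
  obtain ⟨k, rfl⟩ : ∃ k, n = 2 * k + 1 := ⟨n / 2, by omega⟩
  unfold pvO
  have h1 : (2 * k + 1 + 1) / 2 = k + 1 := by omega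
  have h2 : (2 * k + 1) / 2 = k := by omega
  rw [h1, h2]; push_cast; ring

lemma pv_loop (n : Nat) (p s : Int) :
    (PySem.List.pyRange 0 (n : Int) 1).foldl
      (fun (st : Int × Int) num =>
        if PySem.Int.mod num 2 = 0 then (st.1 + num, st.2) else (st.1, st.2 + num))
      (p, s) = (p + pvE n, s + pvO n) := by
  induction n generalizing p s with
  | zero =>
    rw [PySem.List.pyRange_one_eq_nil (by norm_num)]
    simp [pvE, pvO]
  | succ n ih =>
    have hcast : ((n + 1 : Nat) : Int) = (n : Int) + 1 := by push_cast; ring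
    rw [hcast, PySem.List.pyRange_one_succ_right (by positivity), List.foldl_append, ih]
    have hm : PySem.Int.mod ((n : Int)) 2 = (n : Int) % 2 := by
      exact PySem.Int.mod_eq_emod_of_pos (by norm_num)
    rcases Nat.even_or_odd n with he | ho
    · have h : n % 2 = 0 := Nat.even_iff.mp he
      simp only [List.foldl_cons, List.foldl_nil, hm]
      have : (n : Int) % 2 = 0 := by omega
      rw [if_pos this, pvE_succ_even n h, pvO_succ_even n h]
      simp; ring
    · have h : n % 2 = 1 := Nat.odd_iff.mp ho
      simp only [List.foldl_cons, List.foldl_nil, hm]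
      have : ¬ ((n : Int) % 2 = 0) := by omega
      rw [if_neg this, pvE_succ_odd n h, pvO_succ_odd n h]
      simp; ring

-- ===== VERDICT (by name: the statement is the Claim_ definition above) =====
theorem suma_parells_i_senars_spec : Claim_equal_suma_parells_i_senars := by
  intro limit _
  unfold Spec_suma_parells_i_senars suma_parells_i_senars suma_parells_i_senars_alt
  by_cases hle : limit ≤ 0
  · rw [PySem.List.pyRange_one_eq_nil hle, if_pos hle]
    simp
  · rw [if_neg hle]
    have hn : limit = (limit.toNat : Int) := by omega
    rw [hn, pv_loop limit.toNat 0 0]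
    have hq : PySem.Int.floordiv ((limit.toNat : Int)) 2 = ((limit.toNat / 2 : Nat) : Int) := by
      exact_mod_cast PySem.Int.floordiv_natCast limit.toNat 2
    have hm : PySem.Int.floordiv ((limit.toNat : Int) + 1) 2 = (((limit.toNat + 1) / 2 : Nat) : Int) := by
      have h1 : ((limit.toNat : Int) + 1) = ((limit.toNat + 1 : Nat) : Int) := by push_cast; ring
      rw [h1]; exact_mod_cast PySem.Int.floordiv_natCast (limit.toNat + 1) 2
    simp only [hq, hm, pvE, pvO, zero_add]
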